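-- pv_equiv track=rewrite | github.com/VuLAb22cn/AnhVu.github | Lap_trinh_Python/DTDD.py | can_become_complete_graph
-- ===== SOURCE A (Python) =====
-- def dfs(graph, start, visited):
--     stack = [start]
--     while stack:
--         node = stack.pop()
--         if not visited[node]:
--             visited[node] = True
--             for neighbor in graph[node]:
--                 if not visited[neighbor]:
--                     stack.append(neighbor)
--
-- def can_become_complete_graph(N, edges):
--     graph = [[] for _ in range(N)]
--     for u, v in edges:
--         graph[u].append(v)
--         graph[v].append(u)
--
--     visited = [False] * N
--     dfs(graph, 0, visited)
--
--     if all(visited):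
--         return "NO"
--     else:
--         return "YES"
-- ===== SOURCE B (Python) =====
-- def can_become_complete_graph(N, edges):
--     # Edge-relaxation fixpoint instead of DFS: mark nodes reachable from 0 by
--     # sweeping the edge list until no sweep changes anything.
--     reach = [i == 0 for i in range(N)]
--     changed = True
--     while changed:
--         changed = False
--         for u, v in edges:
--             if reach[u] != reach[v]:
--                 reach[u] = True
--                 reach[v] = True
--                 changed = True
--     return "NO" if all(reach) else "YES"
-- ===== Notes on version B (the rewrite author's own statement) =====
-- stated objective: alternative
-- what changed: Replaces building an adjacency-list graph plus an explicit-stack DFS from node 0 with a graph-free edge-relaxation fixpoint: repeatedly sweep the raw edge list, marking both endpoints reachable whenever exactly one is, until a sweep changes nothing.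
import Mathlib
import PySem

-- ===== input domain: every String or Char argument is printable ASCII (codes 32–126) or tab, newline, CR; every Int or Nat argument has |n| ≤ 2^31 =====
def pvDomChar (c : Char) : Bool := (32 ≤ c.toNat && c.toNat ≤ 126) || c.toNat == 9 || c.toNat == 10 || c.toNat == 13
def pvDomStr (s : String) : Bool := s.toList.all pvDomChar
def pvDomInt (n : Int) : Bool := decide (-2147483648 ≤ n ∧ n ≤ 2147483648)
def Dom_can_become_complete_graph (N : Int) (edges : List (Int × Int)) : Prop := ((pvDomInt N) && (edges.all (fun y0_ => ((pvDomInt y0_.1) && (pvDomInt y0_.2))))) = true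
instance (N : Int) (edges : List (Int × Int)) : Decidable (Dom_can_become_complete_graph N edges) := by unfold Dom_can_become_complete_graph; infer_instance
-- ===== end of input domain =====

-- B replaces A's adjacency-list construction + explicit-stack DFS by a graph-free
-- edge-relaxation fixpoint (sweep the edge list until no sweep changes the mark vector);
-- equal output proved on all inputs where A returns (Pre_), objective: alternative.

-- ===== PORT A =====

-- helper lemma cited by pvDfs's decreasing_by: marking a yet-unmarked cell strictly
-- lowers the number of `false` cells.
theorem pvCount_set_true_lt (l : List Bool) (j : Nat) (hj : j < l.length) (hf : l[j] = false) :
    (l.set j true).count false < l.count false := by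
  induction l generalizing j with
  | nil => simp at hj
  | cons x xs ih =>
    cases j with
    | zero => simp_all
    | succ k =>
      simp only [List.set_cons_succ, List.count_cons]
      have := ih k (by simpa using hj) (by simpa using hf)
      omega

theorem pvCount_set_true_le (l : List Bool) (j : Nat) :
    (l.set j true).count false ≤ l.count false := by
  induction l generalizing j with
  | nil => simp
  | cons x xs ih =>
    cases j with
    | zero => cases x <;> simp
    | succ k => simp only [List.set_cons_succ, List.count_cons]; have := ih k; omega

theorem pvGet?_some_elim {α : Type} (xs : List α) (i : Int) (x : α)
    (h : PySem.List.pyGet? xs i = some x) :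
    ∃ k, PySem.List.pyIdx? xs.length i = some k ∧ ∃ (hk : k < xs.length), xs[k] = x := by
  unfold PySem.List.pyGet? at h
  cases hk : PySem.List.pyIdx? xs.length i with
  | none => rw [hk] at h; simp at h
  | some k =>
    rw [hk] at h; simp only [Option.bind_some] at h
    rcases List.getElem?_eq_some_iff.mp h with ⟨hlt, hval⟩
    exact ⟨k, rfl, hlt, hval⟩

theorem pvSet?_some_elim {α : Type} (xs : List α) (i : Int) (v : α) (ys : List α)
    (h : PySem.List.pySet? xs i v = some ys) :
    ∃ k, PySem.List.pyIdx? xs.length i = some k ∧ ys = xs.set k v := by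
  unfold PySem.List.pySet? at h
  cases hk : PySem.List.pyIdx? xs.length i with
  | none => rw [hk] at h; simp at h
  | some k => rw [hk] at h; simp only [Option.map_some, Option.some_inj] at h; exact ⟨k, rfl, h.symm⟩

theorem pvGetD_false_set_lt (v : List Bool) (t : Int)
    (h : PySem.List.pyGetD v t true = false) :
    (PySem.List.pySetD v t true).count false < v.count false := by
  have hsome : PySem.List.pyGet? v t = some false := by
    unfold PySem.List.pyGetD at h
    cases hg : PySem.List.pyGet? v t with
    | none => rw [hg] at h; simp at h
    | some x => rw [hg] at h; simp at h; rw [h]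
  obtain ⟨k, hk, hlt, hval⟩ := pvGet?_some_elim v t false hsome
  have hset : PySem.List.pySetD v t true = v.set k true := by
    unfold PySem.List.pySetD PySem.List.pySet?
    rw [hk]; rfl
  rw [hset]
  exact pvCount_set_true_lt v k hlt hval

theorem pvFire_count (reach : List Bool) (u v : Int) (a b : Bool)
    (hu : PySem.List.pyGet? reach u = some a) (hv : PySem.List.pyGet? reach v = some b)
    (hab : ¬ a = b)
    (r1 r2 : List Bool) (h1 : PySem.List.pySet? reach u true = some r1)
    (h2 : PySem.List.pySet? r1 v true = some r2) :
    r2.count false < reach.count false := by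
  obtain ⟨ku, hku, hkult, hvalu⟩ := pvGet?_some_elim reach u a hu
  obtain ⟨kv, hkv, hkvlt, hvalv⟩ := pvGet?_some_elim reach v b hv
  obtain ⟨ku', hku', hr1⟩ := pvSet?_some_elim reach u true r1 h1
  rw [hku] at hku'; obtain rfl : ku = ku' := by injection hku'
  obtain ⟨kv', hkv', hr2⟩ := pvSet?_some_elim r1 v true r2 h2
  rw [hr1, List.length_set, hkv] at hkv'
  obtain rfl : kv = kv' := by injection hkv'
  have hne : ku ≠ kv := by intro he; subst he; exact hab (hvalu.symm.trans hvalv)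
  subst hr1; subst hr2
  cases a with
  | false =>
    have lt1 := pvCount_set_true_lt reach ku hkult hvalu
    have le2 := pvCount_set_true_le (reach.set ku true) kv
    omega
  | true =>
    have hbf : b = false := by cases b <;> simp_all
    have le1 := pvCount_set_true_le reach ku
    have hkvlt' : kv < (reach.set ku true).length := by simpa using hkvlt
    have helem : (reach.set ku true)[kv]'hkvlt' = false := by
      rw [List.getElem_set_ne hne]; exact hvalv.trans hbf
    have lt2 := pvCount_set_true_lt (reach.set ku true) kv hkvlt' helem
    omega

def pvGraphBuild (N : Int) (edges : List (Int × Int)) : List (List Int) :=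
  edges.foldl (fun g p =>
    let g1 := PySem.List.pySetD g p.1 (PySem.List.pyGetD g p.1 [] ++ [p.2])
    PySem.List.pySetD g1 p.2 (PySem.List.pyGetD g1 p.2 [] ++ [p.1]))
    ((PySem.List.pyRange 0 N 1).map (fun _ => ([] : List Int)))

-- the while-stack loop of dfs; the stack is kept top-first (Python appends/pops at the
-- end, so pushing the neighbour list appends its reverse at the head here).
-- pyGetD's default `true` is only reached outside Pre_ (where Python raises IndexError).
def pvDfs (graph : List (List Int)) (stack : List Int) (visited : List Bool) : List Bool :=
  match stack with
  | [] => visited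
  | t :: rest =>
    if h : PySem.List.pyGetD visited t true then pvDfs graph rest visited
    else
      let visited' := PySem.List.pySetD visited t true
      pvDfs graph (((PySem.List.pyGetD graph t []).filter
          (fun nb => !(PySem.List.pyGetD visited' nb true))).reverse ++ rest) visited'
termination_by (visited.count false, stack.length)
decreasing_by
  · exact Prod.Lex.right _ (by simp)
  · exact Prod.Lex.left _ _ (pvGetD_false_set_lt visited t (by simpa using h))

def can_become_complete_graph (N : Int) (edges : List (Int × Int)) : String :=
  let graph := pvGraphBuild N edges
  let visited := pvDfs graph [0] ((PySem.List.pyRange 0 N 1).map (fun _ => false))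
  if visited.all (fun b => b) then "NO" else "YES"

-- ===== PORT B =====

-- one sweep of `for u, v in edges: if reach[u] != reach[v]: reach[u] = reach[v] = True; changed = True`;
-- none = the sweep hits an out-of-range index (Python raises there).
def pvPass : List (Int × Int) → List Bool → Bool → Option (List Bool × Bool)
  | [], reach, changed => some (reach, changed)
  | p :: rest, reach, changed =>
    match PySem.List.pyGet? reach p.1, PySem.List.pyGet? reach p.2 with
    | some a, some b =>
      if a != b then
        match PySem.List.pySet? reach p.1 true with
        | some r1 =>
          match PySem.List.pySet? r1 p.2 true with
          | some r2 => pvPass rest r2 true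
          | none => none
        | none => none
      else pvPass rest reach changed
    | _, _ => none

-- helper lemma cited by pvLoop's decreasing_by: a sweep never adds `false` cells, and a
-- sweep that reports a change removed at least one.
theorem pvPass_count : ∀ (es : List (Int × Int)) (reach : List Bool) (c : Bool)
    (r' : List Bool) (c' : Bool), pvPass es reach c = some (r', c') →
    r'.count false ≤ reach.count false ∧
      (c = false → c' = true → r'.count false < reach.count false) := by
  intro es
  induction es with
  | nil =>
    intro reach c r' c' h
    simp only [pvPass, Option.some_inj, Prod.mk.injEq] at h
    obtain ⟨rfl, rfl⟩ := h
    exact ⟨le_refl _, by intro h1 h2; rw [h1] at h2; cases h2⟩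
  | cons p rest ih =>
    intro reach c r' c' h
    rw [pvPass] at h
    cases hgu : PySem.List.pyGet? reach p.1 with
    | none => rw [hgu] at h; cases h
    | some a =>
      cases hgv : PySem.List.pyGet? reach p.2 with
      | none => rw [hgu, hgv] at h; cases h
      | some b =>
        rw [hgu, hgv] at h; dsimp only at h
        by_cases hab : (a != b) = true
        · rw [if_pos hab] at h
          cases hs1 : PySem.List.pySet? reach p.1 true with
          | none => rw [hs1] at h; cases h
          | some r1 =>
            rw [hs1] at h; dsimp only at h
            cases hs2 : PySem.List.pySet? r1 p.2 true with
            | none => rw [hs2] at h; cases h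
            | some r2 =>
              rw [hs2] at h; dsimp only at h
              have hfire := pvFire_count reach p.1 p.2 a b hgu hgv
                (by simpa using hab) r1 r2 hs1 hs2
              have hih := (ih r2 true r' c' h).1
              exact ⟨by omega, fun _ _ => by omega⟩
        · rw [if_neg hab] at h
          exact ih reach c r' c' h

def pvLoop (edges : List (Int × Int)) (reach : List Bool) : Option (List Bool) :=
  match h : pvPass edges reach false with
  | none => none
  | some rc => if hc : rc.2 then pvLoop edges rc.1 else some rc.1
termination_by reach.count false
decreasing_by exact (pvPass_count edges reach false rc.1 rc.2 (by simpa using h)).2 rfl hc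

def can_become_complete_graph_alt (N : Int) (edges : List (Int × Int)) : String :=
  match pvLoop edges ((PySem.List.pyRange 0 N 1).map (fun i => decide (i = 0))) with
  | some r => if r.all (fun b => b) then "NO" else "YES"
  | none => ""   -- unreachable inside Pre_ (Python raises IndexError there)

-- ===== PRECONDITION & SPEC =====

-- Pre_ is exactly where Python A returns: A raises IndexError iff N < 1 (dfs reads
-- visited[0] from an empty list) or some edge endpoint is outside [-N, N).
def Pre_can_become_complete_graph (N : Int) (edges : List (Int × Int)) : Prop :=
  1 ≤ N ∧ ∀ p ∈ edges, (-N ≤ p.1 ∧ p.1 < N ∧ -N ≤ p.2 ∧ p.2 < N)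
instance (N : Int) (edges : List (Int × Int)) : Decidable (Pre_can_become_complete_graph N edges) := by
  unfold Pre_can_become_complete_graph; infer_instance

def pvWitness_can_become_complete_graph : Int × (List (Int × Int)) := (2, [(0, 1)])

def Spec_can_become_complete_graph (N : Int) (edges : List (Int × Int)) (out : String) : Prop := out = can_become_complete_graph_alt N edges
instance (N : Int) (edges : List (Int × Int)) (out : String) : Decidable (Spec_can_become_complete_graph N edges out) := by unfold Spec_can_become_complete_graph; infer_instance

-- ===== CLAIM (what is proved, stated in full; the proofs are below) =====
def Claim_equal_can_become_complete_graph : Prop := ∀ (N : Int) (edges : List (Int × Int)), Dom_can_become_complete_graph N edges → Pre_can_become_complete_graph N edges → Spec_can_become_complete_graph N edges (can_become_complete_graph N edges)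

-- ===== LEMMAS AND PROOFS =====

-- Python's normalisation of a (possibly negative) in-range index.
def pvIdx (len : Nat) (i : Int) : Nat := (if i < 0 then i + len else i).toNat

-- the two endpoints of an edge, normalised, are adjacent
def pvAdj (n : Nat) (edges : List (Int × Int)) (a b : Nat) : Prop :=
  ∃ p ∈ edges, (pvIdx n p.1 = a ∧ pvIdx n p.2 = b) ∨ (pvIdx n p.1 = b ∧ pvIdx n p.2 = a)

-- connected to node 0
def pvReach (n : Nat) (edges : List (Int × Int)) (i : Nat) : Prop :=
  Relation.ReflTransGen (pvAdj n edges) 0 i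

theorem pvIdx_lt (len : Nat) (i : Int) (h1 : -(len : Int) ≤ i) (h2 : i < (len : Int)) :
    pvIdx len i < len := by
  unfold pvIdx; split <;> omega

theorem pvGet?_eq {α : Type} (xs : List α) (i : Int)
    (h1 : -(xs.length : Int) ≤ i) (h2 : i < (xs.length : Int)) :
    PySem.List.pyGet? xs i = xs[pvIdx xs.length i]? := by
  unfold PySem.List.pyGet? PySem.List.pyIdx? pvIdx
  split_ifs with ha hb hc <;> simp_all <;> (try omega) <;> (congr 1; omega)

theorem pvSet?_eq {α : Type} (xs : List α) (i : Int) (v : α)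
    (h1 : -(xs.length : Int) ≤ i) (h2 : i < (xs.length : Int)) :
    PySem.List.pySet? xs i v = some (xs.set (pvIdx xs.length i) v) := by
  unfold PySem.List.pySet? PySem.List.pyIdx? pvIdx
  split_ifs with ha hb hc <;> simp_all <;> (try omega) <;> (congr 1; omega)

theorem pvGetD_eq {α : Type} (xs : List α) (i : Int) (d : α)
    (h1 : -(xs.length : Int) ≤ i) (h2 : i < (xs.length : Int)) :
    PySem.List.pyGetD xs i d = xs.getD (pvIdx xs.length i) d := by
  have hlt : pvIdx xs.length i < xs.length := by unfold pvIdx; split <;> omega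
  rw [PySem.List.pyGetD, pvGet?_eq xs i h1 h2, List.getElem?_eq_getElem hlt]
  simp [List.getD, List.getElem?_eq_getElem hlt]

theorem pvSetD_eq {α : Type} (xs : List α) (i : Int) (v : α)
    (h1 : -(xs.length : Int) ≤ i) (h2 : i < (xs.length : Int)) :
    PySem.List.pySetD xs i v = xs.set (pvIdx xs.length i) v := by
  rw [PySem.List.pySetD, pvSet?_eq xs i v h1 h2]; rfl


theorem pvGet?_eq' {α : Type} (xs : List α) (n : Nat) (N i : Int) (hn : (n : Int) = N)
    (hlen : xs.length = n) (h1 : -N ≤ i) (h2 : i < N) :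
    PySem.List.pyGet? xs i = xs[pvIdx n i]? := by
  subst hlen
  exact pvGet?_eq xs i (by omega) (by omega)

theorem pvSet?_eq' {α : Type} (xs : List α) (n : Nat) (N i : Int) (v : α) (hn : (n : Int) = N)
    (hlen : xs.length = n) (h1 : -N ≤ i) (h2 : i < N) :
    PySem.List.pySet? xs i v = some (xs.set (pvIdx n i) v) := by
  subst hlen
  exact pvSet?_eq xs i v (by omega) (by omega)

theorem pvGetD_eq' {α : Type} (xs : List α) (n : Nat) (N i : Int) (d : α) (hn : (n : Int) = N)
    (hlen : xs.length = n) (h1 : -N ≤ i) (h2 : i < N) :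
    PySem.List.pyGetD xs i d = xs.getD (pvIdx n i) d := by
  subst hlen
  exact pvGetD_eq xs i d (by omega) (by omega)

theorem pvSetD_eq' {α : Type} (xs : List α) (n : Nat) (N i : Int) (v : α) (hn : (n : Int) = N)
    (hlen : xs.length = n) (h1 : -N ≤ i) (h2 : i < N) :
    PySem.List.pySetD xs i v = xs.set (pvIdx n i) v := by
  subst hlen
  exact pvSetD_eq xs i v (by omega) (by omega)

theorem pvIdx_lt' (n : Nat) (N i : Int) (hn : (n : Int) = N) (h1 : -N ≤ i) (h2 : i < N) :
    pvIdx n i < n := pvIdx_lt n i (by omega) (by omega)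

-- a set-to-true only adds marks
theorem pvSetTrue_mono (l : List Bool) (k : Nat) (i : Nat)
    (h : l[i]? = some true) : (l.set k true)[i]? = some true := by
  rw [List.getElem?_set]
  split_ifs with h1 h2
  · rfl
  · subst h1; rw [List.getElem?_eq_none (by omega)] at h; cases h
  · exact h

theorem pvSetTrue_elim (l : List Bool) (k : Nat) (i : Nat)
    (h : (l.set k true)[i]? = some true) : i = k ∨ l[i]? = some true := by
  rw [List.getElem?_set] at h
  split_ifs at h with h1 h2
  · exact Or.inl h1.symm
  · exact Or.inr h

-- the full sweep lemma for B's pvPass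
theorem pvPass_spec (N : Int) (edges : List (Int × Int)) (n : Nat) (hn : (n : Int) = N) :
    ∀ (es : List (Int × Int)) (reach : List Bool) (c : Bool),
    reach.length = n →
    (∀ p ∈ es, -N ≤ p.1 ∧ p.1 < N ∧ -N ≤ p.2 ∧ p.2 < N) →
    (∀ p ∈ es, p ∈ edges) →
    (∀ (i : Nat), reach[i]? = some true → pvReach n edges i) →
    ∃ (r' : List Bool) (c' : Bool), pvPass es reach c = some (r', c') ∧ r'.length = n ∧
      (∀ (i : Nat), reach[i]? = some true → r'[i]? = some true) ∧
      (∀ (i : Nat), r'[i]? = some true → pvReach n edges i) ∧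
      (c' = false → c = false ∧ r' = reach ∧
        ∀ p ∈ es, reach[pvIdx n p.1]? = reach[pvIdx n p.2]?) := by
  intro es
  induction es with
  | nil =>
    intro reach c hlen _ _ hsound
    exact ⟨reach, c, rfl, hlen, fun i h => h, hsound,
      fun hc => ⟨hc, rfl, fun p hp => absurd hp (List.not_mem_nil)⟩⟩
  | cons p rest ih =>
    intro reach c hlen hbnd hsub hsound
    obtain ⟨hb1, hb2, hb3, hb4⟩ := hbnd p (List.mem_cons_self ..)
    have hk1 := pvIdx_lt' n N p.1 hn hb1 hb2
    have hk2 := pvIdx_lt' n N p.2 hn hb3 hb4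
    have hg1 : PySem.List.pyGet? reach p.1 = reach[pvIdx n p.1]? :=
      pvGet?_eq' reach n N p.1 hn hlen hb1 hb2
    have hg2 : PySem.List.pyGet? reach p.2 = reach[pvIdx n p.2]? :=
      pvGet?_eq' reach n N p.2 hn hlen hb3 hb4
    have ha : reach[pvIdx n p.1]? = some (reach[pvIdx n p.1]'(by omega)) :=
      List.getElem?_eq_getElem (by omega)
    have hb : reach[pvIdx n p.2]? = some (reach[pvIdx n p.2]'(by omega)) :=
      List.getElem?_eq_getElem (by omega)
    set a := reach[pvIdx n p.1]'(by omega) with hadef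
    set b := reach[pvIdx n p.2]'(by omega) with hbdef
    have hadj : pvAdj n edges (pvIdx n p.1) (pvIdx n p.2) :=
      ⟨p, hsub p (List.mem_cons_self ..), Or.inl ⟨rfl, rfl⟩⟩
    rw [pvPass, hg1, hg2, ha, hb]
    dsimp only
    by_cases hab : (a != b) = true
    · rw [if_pos hab]
      have hs1 : PySem.List.pySet? reach p.1 true = some (reach.set (pvIdx n p.1) true) :=
        pvSet?_eq' reach n N p.1 true hn hlen hb1 hb2
      set r1 := reach.set (pvIdx n p.1) true with hr1
      have hlen1 : r1.length = n := by rw [hr1, List.length_set]; exact hlen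
      have hs2 : PySem.List.pySet? r1 p.2 true = some (r1.set (pvIdx n p.2) true) :=
        pvSet?_eq' r1 n N p.2 true hn hlen1 hb3 hb4
      set r2 := r1.set (pvIdx n p.2) true with hr2
      have hlen2 : r2.length = n := by rw [hr2, List.length_set]; exact hlen1
      -- one endpoint is already reachable, hence both are
      have hone : pvReach n edges (pvIdx n p.1) ∧ pvReach n edges (pvIdx n p.2) := by
        cases hca : a with
        | true =>
          have h1 : pvReach n edges (pvIdx n p.1) := hsound _ (by rw [ha, hca])
          exact ⟨h1, Relation.ReflTransGen.tail h1 hadj⟩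
        | false =>
          have hcb : b = true := by cases hcb : b <;> simp [hca, hcb] at hab ⊢
          have h2 : pvReach n edges (pvIdx n p.2) := hsound _ (by rw [hb, hcb])
          exact ⟨Relation.ReflTransGen.tail h2 ⟨p, hsub p (List.mem_cons_self ..),
            Or.inr ⟨rfl, rfl⟩⟩, h2⟩
      have hsound2 : ∀ (i : Nat), r2[i]? = some true → pvReach n edges i := by
        intro i hi
        rcases pvSetTrue_elim r1 (pvIdx n p.2) i hi with rfl | hi1
        · exact hone.2
        · rcases pvSetTrue_elim reach (pvIdx n p.1) i hi1 with rfl | hi0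
          · exact hone.1
          · exact hsound i hi0
      obtain ⟨r', c', heq, h1, h2, h3, h4⟩ := ih r2 true hlen2
        (fun q hq => hbnd q (List.mem_cons_of_mem _ hq))
        (fun q hq => hsub q (List.mem_cons_of_mem _ hq)) hsound2
      rw [hs1]
      dsimp only
      rw [hs2]
      dsimp only
      refine ⟨r', c', heq, h1, ?_, h3, ?_⟩
      · intro i hi
        exact h2 i (pvSetTrue_mono r1 (pvIdx n p.2) i (pvSetTrue_mono reach (pvIdx n p.1) i hi))
      · intro hc'
        exact absurd (h4 hc').1 (by simp)
    · rw [if_neg hab]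
      have haeb : a = b := by simpa using hab
      obtain ⟨r', c', heq, h1, h2, h3, h4⟩ := ih reach c hlen
        (fun q hq => hbnd q (List.mem_cons_of_mem _ hq))
        (fun q hq => hsub q (List.mem_cons_of_mem _ hq)) hsound
      refine ⟨r', c', heq, h1, h2, h3, ?_⟩
      intro hc'
      obtain ⟨hcf, hrr, hbal⟩ := h4 hc'
      refine ⟨hcf, hrr, fun q hq => ?_⟩
      rcases List.mem_cons.mp hq with rfl | hq'
      · rw [ha, hb, haeb]
      · exact hbal q hq'


theorem pvLoop_spec (N : Int) (edges : List (Int × Int)) (n : Nat) (hn : (n : Int) = N)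
    (hbnd : ∀ p ∈ edges, -N ≤ p.1 ∧ p.1 < N ∧ -N ≤ p.2 ∧ p.2 < N) :
    ∀ reach : List Bool, reach.length = n →
    (∀ (i : Nat), reach[i]? = some true → pvReach n edges i) →
    reach[0]? = some true →
    ∃ r' : List Bool, pvLoop edges reach = some r' ∧ r'.length = n ∧
      ∀ i : Nat, i < n → (r'[i]? = some true ↔ pvReach n edges i) := by
  intro reach0
  induction reach0 using pvLoop.induct edges with
  | case1 x hnone =>
    intro hlen hsound h0
    obtain ⟨r', c', heq, _⟩ := pvPass_spec N edges n hn edges x false hlen hbnd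
      (fun q hq => hq) hsound
    rw [hnone] at heq; cases heq
  | case2 x rc heq htrue ihm =>
    intro hlen hsound h0
    obtain ⟨r', c', heq2, hlen2, hmono, hsound2, _⟩ := pvPass_spec N edges n hn edges x false
      hlen hbnd (fun q hq => hq) hsound
    rw [heq] at heq2
    injection heq2 with heq2
    subst heq2
    obtain ⟨rr, hrr, hrlen, hriff⟩ := ihm hlen2 hsound2 (hmono 0 h0)
    refine ⟨rr, ?_, hrlen, hriff⟩
    rw [pvLoop, heq]
    dsimp only
    rw [dif_pos (by simpa using htrue)]
    simpa using hrr
  | case3 x rc heq hfalse =>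
    intro hlen hsound h0
    obtain ⟨r', c', heq2, hlen2, hmono, hsound2, hfix⟩ := pvPass_spec N edges n hn edges x false
      hlen hbnd (fun q hq => hq) hsound
    rw [heq] at heq2
    injection heq2 with heq2
    subst heq2
    have hc' : c' = false := by simpa using hfalse
    obtain ⟨_, hrr, hbal⟩ := hfix hc'
    refine ⟨r', ?_, hlen2, ?_⟩
    · rw [pvLoop, heq]
      dsimp only
      rw [dif_neg (by simpa using hfalse)]
    · subst hrr
      intro i hi
      constructor
      · exact hsound i
      · intro hreach
        clear hi
        induction hreach with
        | refl => exact h0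
        | tail hstep hadj ihh =>
          obtain ⟨q, hq, hcase⟩ := hadj
          have hbq := hbnd q hq
          have hbalq := hbal q hq
          rcases hcase with ⟨he1, he2⟩ | ⟨he1, he2⟩
          · rw [← he2, ← hbalq, he1]; exact ihh
          · rw [← he1, hbalq, he2]; exact ihh


theorem pvGetD_set_list {α : Type} (g : List α) (j : Nat) (l : α) (a : Nat) (d : α)
    (hj : j < g.length) :
    (g.set j l).getD a d = if a = j then l else g.getD a d := by
  rw [List.getD_eq_getElem?_getD, List.getD_eq_getElem?_getD, List.getElem?_set]
  by_cases haj : a = j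
  · rw [if_pos haj.symm, if_pos (haj ▸ hj), if_pos haj]; rfl
  · rw [if_neg (fun h => haj h.symm), if_neg haj]

theorem pvBuild_inv (N : Int) (n : Nat) (hn : (n : Int) = N) :
    ∀ (es : List (Int × Int)) (g : List (List Int)),
    g.length = n →
    (∀ p ∈ es, -N ≤ p.1 ∧ p.1 < N ∧ -N ≤ p.2 ∧ p.2 < N) →
    (es.foldl (fun g p =>
        let g1 := PySem.List.pySetD g p.1 (PySem.List.pyGetD g p.1 [] ++ [p.2])
        PySem.List.pySetD g1 p.2 (PySem.List.pyGetD g1 p.2 [] ++ [p.1])) g).length = n ∧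
      ∀ (a : Nat) (x : Int), x ∈ (es.foldl (fun g p =>
        let g1 := PySem.List.pySetD g p.1 (PySem.List.pyGetD g p.1 [] ++ [p.2])
        PySem.List.pySetD g1 p.2 (PySem.List.pyGetD g1 p.2 [] ++ [p.1])) g).getD a [] ↔
        x ∈ g.getD a [] ∨ ∃ p ∈ es, (pvIdx n p.1 = a ∧ x = p.2) ∨ (pvIdx n p.2 = a ∧ x = p.1) := by
  intro es
  induction es with
  | nil =>
    intro g hlen _
    exact ⟨hlen, fun a x => by simp⟩
  | cons p rest ih =>
    intro g hlen hbnd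
    obtain ⟨hb1, hb2, hb3, hb4⟩ := hbnd p (List.mem_cons_self ..)
    have hj1 : pvIdx n p.1 < n := pvIdx_lt' n N p.1 hn hb1 hb2
    have hj2 : pvIdx n p.2 < n := pvIdx_lt' n N p.2 hn hb3 hb4
    have hget1 : PySem.List.pyGetD g p.1 ([] : List Int) = g.getD (pvIdx n p.1) [] :=
      pvGetD_eq' g n N p.1 [] hn hlen hb1 hb2
    have hset1 : PySem.List.pySetD g p.1 (g.getD (pvIdx n p.1) [] ++ [p.2]) =
        g.set (pvIdx n p.1) (g.getD (pvIdx n p.1) [] ++ [p.2]) :=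
      pvSetD_eq' g n N p.1 _ hn hlen hb1 hb2
    set g1 := g.set (pvIdx n p.1) (g.getD (pvIdx n p.1) [] ++ [p.2]) with hg1
    have hlen1 : g1.length = n := by rw [hg1, List.length_set]; exact hlen
    have hget2 : PySem.List.pyGetD g1 p.2 ([] : List Int) = g1.getD (pvIdx n p.2) [] :=
      pvGetD_eq' g1 n N p.2 [] hn hlen1 hb3 hb4
    have hset2 : PySem.List.pySetD g1 p.2 (g1.getD (pvIdx n p.2) [] ++ [p.1]) =
        g1.set (pvIdx n p.2) (g1.getD (pvIdx n p.2) [] ++ [p.1]) :=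
      pvSetD_eq' g1 n N p.2 _ hn hlen1 hb3 hb4
    set g2 := g1.set (pvIdx n p.2) (g1.getD (pvIdx n p.2) [] ++ [p.1]) with hg2
    have hlen2 : g2.length = n := by rw [hg2, List.length_set]; exact hlen1
    have hmem : ∀ (a : Nat) (x : Int), x ∈ g2.getD a [] ↔
        x ∈ g.getD a [] ∨ (pvIdx n p.1 = a ∧ x = p.2) ∨ (pvIdx n p.2 = a ∧ x = p.1) := by
      intro a x
      rw [hg2, pvGetD_set_list g1 (pvIdx n p.2) _ a [] (by omega)]
      by_cases ha2 : a = pvIdx n p.2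
      · rw [if_pos ha2, hg1, pvGetD_set_list g (pvIdx n p.1) _ (pvIdx n p.2) [] (by omega)]
        by_cases ha1 : pvIdx n p.2 = pvIdx n p.1
        · rw [if_pos ha1]
          have e1 : pvIdx n p.1 = a := by rw [← ha1, ← ha2]
          have e2 : pvIdx n p.2 = a := ha2.symm
          simp only [List.mem_append, List.mem_singleton, e1, e2, eq_self_iff_true, true_and]
          tauto
        · rw [if_neg ha1]
          have e2 : pvIdx n p.2 = a := ha2.symm
          have h1 : ¬ pvIdx n p.1 = a := fun h => ha1 (e2.trans h.symm)
          simp only [List.mem_append, List.mem_singleton, e2, h1, eq_self_iff_true, true_and,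
            false_and, false_or]
      · rw [if_neg ha2, hg1, pvGetD_set_list g (pvIdx n p.1) _ a [] (by omega)]
        by_cases ha1 : a = pvIdx n p.1
        · rw [if_pos ha1]
          have e1 : pvIdx n p.1 = a := ha1.symm
          have h2 : ¬ pvIdx n p.2 = a := fun h => ha2 h.symm
          simp only [List.mem_append, List.mem_singleton, e1, h2, eq_self_iff_true, true_and,
            false_and, or_false]
        · rw [if_neg ha1]
          have h1 : ¬ pvIdx n p.1 = a := fun h => ha1 h.symm
          have h2 : ¬ pvIdx n p.2 = a := fun h => ha2 h.symm
          simp only [h1, h2, false_and, or_false]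
    rw [List.foldl_cons]
    dsimp only
    rw [hget1, hset1, hget2, hset2]
    obtain ⟨ihlen, ihmem⟩ := ih g2 hlen2 (fun q hq => hbnd q (List.mem_cons_of_mem _ hq))
    refine ⟨ihlen, fun a x => ?_⟩
    rw [ihmem a x, hmem a x]
    simp only [List.exists_mem_cons_iff]
    rw [or_assoc]


theorem pvGetD_elem (v : List Bool) (n : Nat) (N t : Int) (d : Bool) (hn : (n : Int) = N)
    (hlen : v.length = n) (h1 : -N ≤ t) (h2 : t < N) :
    v[pvIdx n t]? = some (PySem.List.pyGetD v t d) := by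
  rw [pvGetD_eq' v n N t d hn hlen h1 h2, List.getD_eq_getElem?_getD,
    List.getElem?_eq_getElem (show pvIdx n t < v.length from hlen ▸ pvIdx_lt' n N t hn h1 h2)]
  rfl

theorem pvSet_self_true (l : List Bool) (k : Nat) (hk : k < l.length) :
    (l.set k true)[k]? = some true := by
  rw [List.getElem?_set]
  simp [hk]

theorem pvDfs_length (G : List (List Int)) : ∀ (stack : List Int) (visited : List Bool),
    (pvDfs G stack visited).length = visited.length := by
  intro stack visited
  induction stack, visited using pvDfs.induct G with
  | case1 v => rw [pvDfs]
  | case2 v t rest h ih => rw [pvDfs, dif_pos h]; exact ih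
  | case3 v t rest h visited' ih =>
    rw [pvDfs, dif_neg h]
    dsimp only
    rw [ih, PySem.List.length_pySetD]

theorem pvDfs_inv (N : Int) (edges : List (Int × Int)) (n : Nat) (hn : (n : Int) = N)
    (hedges : ∀ p ∈ edges, -N ≤ p.1 ∧ p.1 < N ∧ -N ≤ p.2 ∧ p.2 < N)
    (G : List (List Int)) (hGlen : G.length = n)
    (hGs : ∀ (a : Nat) (x : Int), x ∈ G.getD a [] →
      ∃ p ∈ edges, (pvIdx n p.1 = a ∧ x = p.2) ∨ (pvIdx n p.2 = a ∧ x = p.1))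
    (hGc : ∀ p ∈ edges, p.2 ∈ G.getD (pvIdx n p.1) [] ∧ p.1 ∈ G.getD (pvIdx n p.2) []) :
    ∀ (stack : List Int) (visited : List Bool),
    visited.length = n →
    (∀ s ∈ stack, -N ≤ s ∧ s < N) →
    (∀ s ∈ stack, pvReach n edges (pvIdx n s)) →
    (∀ (i : Nat), visited[i]? = some true → pvReach n edges i) →
    (∀ (a b : Nat), visited[a]? = some true → pvAdj n edges a b →
        (visited[b]? = some true ∨ ∃ s ∈ stack, pvIdx n s = b)) →
    (visited[0]? = some true ∨ ∃ s ∈ stack, pvIdx n s = 0) →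
    ∀ (i : Nat), i < n → ((pvDfs G stack visited)[i]? = some true ↔ pvReach n edges i) := by
  intro stack visited
  induction stack, visited using pvDfs.induct G with
  | case1 v =>
    intro hlen hsb hsr hsound hcov h0 i hi
    rw [pvDfs]
    constructor
    · exact hsound i
    · intro hreach
      clear hi
      induction hreach with
      | refl =>
        rcases h0 with h | ⟨s, hs, _⟩
        · exact h
        · exact absurd hs (List.not_mem_nil)
      | tail hstep hadj ihh =>
        rcases hcov _ _ ihh hadj with h | ⟨s, hs, _⟩
        · exact h
        · exact absurd hs (List.not_mem_nil)
  | case2 v t rest h ih =>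
    intro hlen hsb hsr hsound hcov h0
    obtain ⟨hb1, hb2⟩ := hsb t (List.mem_cons_self ..)
    have ht : v[pvIdx n t]? = some true := by
      rw [pvGetD_elem v n N t true hn hlen hb1 hb2, h]
    rw [pvDfs, dif_pos h]
    refine ih hlen (fun s hs => hsb s (List.mem_cons_of_mem _ hs))
      (fun s hs => hsr s (List.mem_cons_of_mem _ hs)) hsound ?_ ?_
    · intro a b ha hadj
      rcases hcov a b ha hadj with hv | ⟨s, hs, hps⟩
      · exact Or.inl hv
      · rcases List.mem_cons.mp hs with rfl | hs'
        · exact Or.inl (hps ▸ ht)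
        · exact Or.inr ⟨s, hs', hps⟩
    · rcases h0 with hv | ⟨s, hs, hps⟩
      · exact Or.inl hv
      · rcases List.mem_cons.mp hs with rfl | hs'
        · exact Or.inl (hps ▸ ht)
        · exact Or.inr ⟨s, hs', hps⟩
  | case3 v t rest h visited' ih =>
    intro hlen hsb hsr hsound hcov h0
    obtain ⟨hb1, hb2⟩ := hsb t (List.mem_cons_self ..)
    have hk : pvIdx n t < n := pvIdx_lt' n N t hn hb1 hb2
    have hfalse : PySem.List.pyGetD v t true = false := by
      cases hc : PySem.List.pyGetD v t true
      · rfl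
      · exact absurd hc h
    have hset : PySem.List.pySetD v t true = v.set (pvIdx n t) true :=
      pvSetD_eq' v n N t true hn hlen hb1 hb2
    have hgraph : PySem.List.pyGetD G t ([] : List Int) = G.getD (pvIdx n t) [] :=
      pvGetD_eq' G n N t [] hn hGlen hb1 hb2
    have hreacht : pvReach n edges (pvIdx n t) := hsr t (List.mem_cons_self ..)
    have hlen' : (v.set (pvIdx n t) true).length = n := by rw [List.length_set]; exact hlen
    have hnb : ∀ nb ∈ G.getD (pvIdx n t) [], (-N ≤ nb ∧ nb < N) ∧
        pvAdj n edges (pvIdx n t) (pvIdx n nb) := by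
      intro nb hmem
      obtain ⟨p, hp, hcase⟩ := hGs (pvIdx n t) nb hmem
      obtain ⟨hq1, hq2, hq3, hq4⟩ := hedges p hp
      rcases hcase with ⟨he1, rfl⟩ | ⟨he1, rfl⟩
      · exact ⟨⟨hq3, hq4⟩, ⟨p, hp, Or.inl ⟨he1, rfl⟩⟩⟩
      · exact ⟨⟨hq1, hq2⟩, ⟨p, hp, Or.inr ⟨rfl, he1⟩⟩⟩
    have hvt : v[pvIdx n t]? = some false := by
      rw [pvGetD_elem v n N t true hn hlen hb1 hb2, hfalse]
    have hv2 : visited' = v.set (pvIdx n t) true := hset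
    rw [pvDfs, dif_neg h]
    dsimp only
    rw [hset]
    rw [hv2] at ih
    have hmempush : ∀ s : Int, s ∈ (List.filter
        (fun nb => !PySem.List.pyGetD (v.set (pvIdx n t) true) nb true)
          (PySem.List.pyGetD G t [])).reverse ++ rest →
        s ∈ rest ∨ (s ∈ G.getD (pvIdx n t) [] ∧
          PySem.List.pyGetD (v.set (pvIdx n t) true) s true = false) := by
      intro s hs
      rcases List.mem_append.mp hs with hs' | hs'
      · rw [List.mem_reverse, List.mem_filter, hgraph] at hs'
        exact Or.inr ⟨hs'.1, by simpa using hs'.2⟩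
      · exact Or.inl hs'
    refine ih hlen' ?_ ?_ ?_ ?_ ?_
    · intro s hs
      rcases hmempush s hs with hs' | ⟨hs', _⟩
      · exact hsb s (List.mem_cons_of_mem _ hs')
      · exact (hnb s hs').1
    · intro s hs
      rcases hmempush s hs with hs' | ⟨hs', _⟩
      · exact hsr s (List.mem_cons_of_mem _ hs')
      · exact Relation.ReflTransGen.tail hreacht (hnb s hs').2
    · intro i hi
      rcases pvSetTrue_elim v (pvIdx n t) i hi with rfl | hi'
      · exact hreacht
      · exact hsound i hi'
    · intro a b ha hadj
      rcases pvSetTrue_elim v (pvIdx n t) a ha with rfl | ha'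
      · -- a is the newly visited node: every neighbour is either marked or pushed
        obtain ⟨p, hp, hcase⟩ := hadj
        have hGcp := hGc p hp
        obtain ⟨hq1, hq2, hq3, hq4⟩ := hedges p hp
        have hx : ∃ x ∈ G.getD (pvIdx n t) [], pvIdx n x = b ∧ -N ≤ x ∧ x < N := by
          rcases hcase with ⟨he1, he2⟩ | ⟨he1, he2⟩
          · exact ⟨p.2, he1 ▸ hGcp.1, he2, hq3, hq4⟩
          · exact ⟨p.1, he2 ▸ hGcp.2, he1, hq1, hq2⟩
        obtain ⟨x, hxmem, hxb, hxb1, hxb2⟩ := hx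
        cases hgx : PySem.List.pyGetD (v.set (pvIdx n t) true) x true with
        | false =>
          refine Or.inr ⟨x, ?_, hxb⟩
          refine List.mem_append.mpr (Or.inl ?_)
          rw [List.mem_reverse, List.mem_filter, hgraph]
          exact ⟨hxmem, by simp [hgx]⟩
        | true =>
          refine Or.inl ?_
          rw [← hxb]
          rw [pvGetD_elem (v.set (pvIdx n t) true) n N x true hn hlen' hxb1 hxb2, hgx]
      · rcases hcov a b ha' hadj with hv | ⟨s, hs, hps⟩
        · exact Or.inl (pvSetTrue_mono v (pvIdx n t) b hv)
        · rcases List.mem_cons.mp hs with rfl | hs'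
          · exact Or.inl (hps ▸ pvSet_self_true v (pvIdx n s) (by omega))
          · exact Or.inr ⟨s, List.mem_append.mpr (Or.inr hs'), hps⟩
    · rcases h0 with hv | ⟨s, hs, hps⟩
      · exact Or.inl (pvSetTrue_mono v (pvIdx n t) 0 hv)
      · rcases List.mem_cons.mp hs with rfl | hs'
        · exact Or.inl (hps ▸ pvSet_self_true v (pvIdx n s) (by omega))
        · exact Or.inr ⟨s, List.mem_append.mpr (Or.inr hs'), hps⟩

theorem pvIdx_zero (n : Nat) : pvIdx n 0 = 0 := by unfold pvIdx; simp

-- ===== VERDICT (by name: the statement is the Claim_ definition above) =====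

theorem can_become_complete_graph_spec : Claim_equal_can_become_complete_graph := by
  unfold Claim_equal_can_become_complete_graph
  intro N edges _ hPre
  unfold Spec_can_become_complete_graph
  obtain ⟨hN, hedges⟩ := hPre
  set n := N.toNat with hndef
  have hn : (n : Int) = N := by omega
  have hn0 : 0 < n := by omega
  -- the initial all-[] adjacency list
  have hinit : ∀ a : Nat, ((PySem.List.pyRange 0 N 1).map (fun _ => ([] : List Int))).getD a [] = [] := by
    intro a
    rw [List.getD_eq_getElem?_getD, List.getElem?_map]
    cases h : (PySem.List.pyRange 0 N 1)[a]? <;> simp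
  have hinitlen : ((PySem.List.pyRange 0 N 1).map (fun _ => ([] : List Int))).length = n := by
    rw [List.length_map, PySem.List.length_pyRange_one]
    omega
  have hbuild := pvBuild_inv N n hn edges
    ((PySem.List.pyRange 0 N 1).map (fun _ => ([] : List Int))) hinitlen hedges
  rw [← pvGraphBuild] at hbuild
  obtain ⟨hGlen, hGmem⟩ := hbuild
  set G := pvGraphBuild N edges with hGdef
  have hGs : ∀ (a : Nat) (x : Int), x ∈ G.getD a [] →
      ∃ p ∈ edges, (pvIdx n p.1 = a ∧ x = p.2) ∨ (pvIdx n p.2 = a ∧ x = p.1) := by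
    intro a x hx
    rcases (hGmem a x).mp hx with hx' | hx'
    · rw [hinit a] at hx'; cases hx'
    · exact hx'
  have hGc : ∀ p ∈ edges, p.2 ∈ G.getD (pvIdx n p.1) [] ∧ p.1 ∈ G.getD (pvIdx n p.2) [] := by
    intro p hp
    constructor
    · exact (hGmem (pvIdx n p.1) p.2).mpr (Or.inr ⟨p, hp, Or.inl ⟨rfl, rfl⟩⟩)
    · exact (hGmem (pvIdx n p.2) p.1).mpr (Or.inr ⟨p, hp, Or.inr ⟨rfl, rfl⟩⟩)
  -- the initial visited vector of A
  have hv0 : ∀ i : Nat, ¬ ((PySem.List.pyRange 0 N 1).map (fun _ => false))[i]? = some true := by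
    intro i h
    rw [List.getElem?_map] at h
    cases hx : (PySem.List.pyRange 0 N 1)[i]? <;> rw [hx] at h <;> simp at h
  have hv0len : ((PySem.List.pyRange 0 N 1).map (fun _ => false)).length = n := by
    rw [List.length_map, PySem.List.length_pyRange_one]; omega
  have hA := pvDfs_inv N edges n hn hedges G hGlen hGs hGc [0]
    ((PySem.List.pyRange 0 N 1).map (fun _ => false)) hv0len
    (by intro s hs; rcases List.mem_cons.mp hs with rfl | hs'
        · constructor <;> omega
        · cases hs')
    (by intro s hs; rcases List.mem_cons.mp hs with rfl | hs'
        · rw [pvIdx_zero]; exact Relation.ReflTransGen.refl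
        · cases hs')
    (fun i hi => absurd hi (hv0 i))
    (fun a b ha _ => absurd ha (hv0 a))
    (Or.inr ⟨0, List.mem_cons_self .., pvIdx_zero n⟩)
  set vA := pvDfs G [0] ((PySem.List.pyRange 0 N 1).map (fun _ => false)) with hvAdef
  have hAlen : vA.length = n := by rw [hvAdef, pvDfs_length]; exact hv0len
  -- the initial reach vector of B
  have hr0len : ((PySem.List.pyRange 0 N 1).map (fun i => decide (i = 0))).length = n := by
    rw [List.length_map, PySem.List.length_pyRange_one]; omega
  have hr0elem : ∀ k : Nat, k < n →
      ((PySem.List.pyRange 0 N 1).map (fun i => decide (i = 0)))[k]? = some (decide (k = 0)) := by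
    intro k hk
    rw [← hn, PySem.List.getElem?_map_pyRange_zero _ n k hk]
    congr 1
    simp
  have hr0sound : ∀ i : Nat,
      ((PySem.List.pyRange 0 N 1).map (fun i => decide (i = 0)))[i]? = some true →
      pvReach n edges i := by
    intro i hi
    by_cases hilt : i < n
    · rw [hr0elem i hilt] at hi
      have : i = 0 := by simpa using hi
      subst this
      exact Relation.ReflTransGen.refl
    · rw [List.getElem?_eq_none (by omega)] at hi
      cases hi
  have hr00 : ((PySem.List.pyRange 0 N 1).map (fun i => decide (i = 0)))[0]? = some true := by
    rw [hr0elem 0 hn0]; simp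
  obtain ⟨rB, hrB, hrBlen, hrBiff⟩ := pvLoop_spec N edges n hn hedges
    ((PySem.List.pyRange 0 N 1).map (fun i => decide (i = 0))) hr0len hr0sound hr00
  -- the two final vectors coincide
  have hveq : vA = rB := by
    apply List.ext_getElem (by omega)
    intro i h1 h2
    have e1 : vA[i] = true ↔ pvReach n edges i := by
      rw [← Option.some_inj (b := true), ← List.getElem?_eq_getElem h1]
      exact hA i (by omega)
    have e2 : rB[i] = true ↔ pvReach n edges i := by
      rw [← Option.some_inj (b := true), ← List.getElem?_eq_getElem h2]
      exact hrBiff i (by omega)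
    by_cases hr : pvReach n edges i
    · rw [e1.mpr hr, e2.mpr hr]
    · have b1 : ¬ vA[i] = true := fun hh => hr (e1.mp hh)
      have b2 : ¬ rB[i] = true := fun hh => hr (e2.mp hh)
      rw [Bool.not_eq_true] at b1 b2
      rw [b1, b2]
  show can_become_complete_graph N edges = can_become_complete_graph_alt N edges
  rw [can_become_complete_graph, can_become_complete_graph_alt, hrB]
  dsimp only
  rw [← hGdef, ← hvAdef, hveq]
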